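-- pv_equiv track=rewrite | github.com/mstretavsky/AOC | 2023/Day13_A.py | GetMirroredLines
-- ===== SOURCE A (Python) =====
-- def GetMirroredLines(mirrors:[]):
--     for i in range(1, len(mirrors)):
--         abovemirror = mirrors[:i][::-1]
--         bellowmirror = mirrors[i:]
--
--         abovemirror = abovemirror[:len(bellowmirror)]
--         bellowmirror = bellowmirror[:len(abovemirror)]
--
--         if abovemirror == bellowmirror:
--             return i
--     return 0
-- ===== SOURCE B (Python) =====
-- def GetMirroredLines(mirrors):
--     n = len(mirrors)
--     for i in range(1, n):
--         lo, hi = i - 1, i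
--         while lo >= 0 and hi < n and mirrors[lo] == mirrors[hi]:
--             lo -= 1
--             hi += 1
--         if lo < 0 or hi >= n:
--             return i
--     return 0
-- ===== Notes on version B (the rewrite author's own statement) =====
-- stated objective: faster
-- what changed: Replaces A's per-axis slice/reverse/truncate list construction and whole-list comparison by an in-place two-pointer expansion around each candidate axis with early exit on the first mismatching pair, building no intermediate lists.
import Mathlib
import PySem

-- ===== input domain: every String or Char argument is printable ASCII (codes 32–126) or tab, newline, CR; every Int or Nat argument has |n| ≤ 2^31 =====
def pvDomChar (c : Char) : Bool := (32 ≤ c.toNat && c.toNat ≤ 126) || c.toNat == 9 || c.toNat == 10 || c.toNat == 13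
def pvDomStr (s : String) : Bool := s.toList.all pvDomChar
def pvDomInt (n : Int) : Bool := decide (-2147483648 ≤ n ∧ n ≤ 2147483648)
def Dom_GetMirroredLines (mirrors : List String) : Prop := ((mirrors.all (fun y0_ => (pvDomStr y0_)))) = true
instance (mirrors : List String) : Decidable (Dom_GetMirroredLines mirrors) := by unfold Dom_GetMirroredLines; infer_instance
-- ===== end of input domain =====

-- B replaces A's slice/reverse/truncate list building per axis by an in-place two-pointer
-- expansion with early exit (measured faster; same worst-case bound).


-- ===== PORT A =====
-- the body of A's 'for i in range(1, len(mirrors))' loop with its early 'return i'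
def goA (xs : List String) : List Int → Int
  | [] => 0                                    -- loop fell through: 'return 0'
  | i :: rest =>
    let abovemirror := PySem.List.slice xs none (some i)        -- mirrors[:i]
    let abovemirror := abovemirror.reverse                      -- [::-1] (= PySem.List.slice?_none_none_neg_one)
    let bellowmirror := PySem.List.slice xs (some i) none       -- mirrors[i:]
    let abovemirror := PySem.List.slice abovemirror none (some (bellowmirror.length : Int))
    let bellowmirror := PySem.List.slice bellowmirror none (some (abovemirror.length : Int))
    if abovemirror = bellowmirror then i else goA xs rest

def GetMirroredLines (mirrors : List String) : Int :=
  goA mirrors (PySem.List.pyRange 1 (mirrors.length : Int) 1)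

-- ===== PORT B =====
-- the 'while lo >= 0 and hi < n and mirrors[lo] == mirrors[hi]: lo -= 1; hi += 1' loop
def walkB (xs : List String) (n lo hi : Int) : Int × Int :=
  if h : 0 ≤ lo ∧ hi < n ∧ PySem.List.pyGetD xs lo "" = PySem.List.pyGetD xs hi "" then
    walkB xs n (lo - 1) (hi + 1)
  else (lo, hi)
termination_by (lo + 1).toNat
decreasing_by omega

-- the 'for i in range(1, n)' loop of B with its early 'return i'
def goB (xs : List String) (n : Int) : List Int → Int
  | [] => 0
  | i :: rest =>
    let p := walkB xs n (i - 1) i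
    if p.1 < 0 ∨ n ≤ p.2 then i else goB xs n rest

def GetMirroredLines_alt (mirrors : List String) : Int :=
  goB mirrors (mirrors.length : Int) (PySem.List.pyRange 1 (mirrors.length : Int) 1)

-- ===== PRECONDITION & SPEC =====
def Spec_GetMirroredLines (mirrors : List String) (out : Int) : Prop := out = GetMirroredLines_alt mirrors
instance (mirrors : List String) (out : Int) : Decidable (Spec_GetMirroredLines mirrors out) := by unfold Spec_GetMirroredLines; infer_instance

-- ===== CLAIM (what is proved, stated in full; the proofs are below) =====
def Claim_equal_GetMirroredLines : Prop := ∀ (mirrors : List String), Dom_GetMirroredLines mirrors → Spec_GetMirroredLines mirrors (GetMirroredLines mirrors)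

-- ===== LEMMAS AND PROOFS =====

-- truncated-prefix equality is pointwise equality on the overlap
lemma take_len_eq_iff (a b : List String) :
    a.take b.length = b.take a.length ↔
      ∀ (k : Nat) (h1 : k < a.length) (h2 : k < b.length), a[k] = b[k] := by
  induction a generalizing b with
  | nil => simp
  | cons x a ih =>
    cases b with
    | nil => simp
    | cons y b =>
      simp only [List.length_cons, List.take_succ_cons, List.cons.injEq]
      rw [ih b]
      constructor
      · rintro ⟨hxy, h⟩ k h1 h2
        cases k with
        | zero => simpa using hxy
        | succ k => simpa using h k (by omega) (by omega)
      · intro h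
        refine ⟨by simpa using h 0 (by omega) (by omega), fun k h1 h2 => ?_⟩
        simpa using h (k+1) (by omega) (by omega)

-- the two-pointer walk succeeds iff every in-range reflected pair matches
lemma walkB_iff (xs : List String) (lo hi : Int) (h2 : -1 ≤ lo) (h1 : lo < (xs.length : Int))
    (h3 : 0 ≤ hi) (h4 : hi ≤ (xs.length : Int)) :
    ((walkB xs xs.length lo hi).1 < 0 ∨ (xs.length : Int) ≤ (walkB xs xs.length lo hi).2) ↔
      ∀ k : Nat, (k : Int) ≤ lo → hi + k < (xs.length : Int) →
        PySem.List.pyGetD xs (lo - k) "" = PySem.List.pyGetD xs (hi + k) "" := by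
  generalize hN : (lo + 1).toNat = N
  induction N generalizing lo hi with
  | zero =>
    have hlo : lo = -1 := by omega
    rw [walkB]
    have hC : ¬ (0 ≤ lo ∧ hi < (xs.length : Int) ∧
        PySem.List.pyGetD xs lo "" = PySem.List.pyGetD xs hi "") := by
      intro h; omega
    rw [dif_neg hC]
    constructor
    · intro _ k hk _; exfalso; omega
    · intro _; left; omega
  | succ N ih =>
    rw [walkB]
    by_cases hC : (0 ≤ lo ∧ hi < (xs.length : Int) ∧
        PySem.List.pyGetD xs lo "" = PySem.List.pyGetD xs hi "")
    · rw [dif_pos hC]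
      rw [ih (lo - 1) (hi + 1) (by omega) (by omega) (by omega) (by omega) (by omega)]
      constructor
      · intro h k hk hkl
        cases k with
        | zero => simpa using hC.2.2
        | succ k =>
          have e1 : lo - ((k + 1 : Nat) : Int) = lo - 1 - k := by push_cast; ring
          have e2 : hi + ((k + 1 : Nat) : Int) = hi + 1 + k := by push_cast; ring
          rw [e1, e2]
          exact h k (by omega) (by omega)
      · intro h k hk hkl
        have e1 : lo - 1 - (k : Int) = lo - ((k + 1 : Nat) : Int) := by push_cast; ring
        have e2 : hi + 1 + (k : Int) = hi + ((k + 1 : Nat) : Int) := by push_cast; ring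
        rw [e1, e2]
        exact h (k + 1) (by omega) (by omega)
    · rw [dif_neg hC]
      by_cases hlo : lo < 0
      · constructor
        · intro _ k hk _; exfalso; omega
        · intro _; left; simpa using hlo
      · by_cases hhi : (xs.length : Int) ≤ hi
        · constructor
          · intro _ k _ hkl; exfalso; omega
          · intro _; right; simpa using hhi
        · have hne : ¬ PySem.List.pyGetD xs lo "" = PySem.List.pyGetD xs hi "" := by
            intro he; exact hC ⟨by omega, by omega, he⟩
          constructor
          · intro h
            exfalso
            rcases h with h | h
            · simp at h; omega
            · simp at h; omega
          · intro h
            exfalso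
            apply hne
            have := h 0 (by omega) (by omega)
            simpa using this

-- the per-axis conditions of the two programs agree on 1 <= i < n
lemma cond_eq (xs : List String) (i : Int) (h1 : 1 ≤ i) (h2 : i < (xs.length : Int)) :
    (PySem.List.slice (PySem.List.slice xs none (some i)).reverse none
        (some ((PySem.List.slice xs (some i) none).length : Int)) =
     PySem.List.slice (PySem.List.slice xs (some i) none) none
        (some ((PySem.List.slice (PySem.List.slice xs none (some i)).reverse none
          (some ((PySem.List.slice xs (some i) none).length : Int))).length : Int))) ↔
    ((walkB xs xs.length (i - 1) i).1 < 0 ∨ (xs.length : Int) ≤ (walkB xs xs.length (i - 1) i).2) := by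
  obtain ⟨j, rfl⟩ : ∃ j : Nat, i = (j : Int) := ⟨i.toNat, (Int.toNat_of_nonneg (by omega)).symm⟩
  have hj1 : 1 ≤ j := by exact_mod_cast h1
  have hj2 : j < xs.length := by exact_mod_cast h2
  set n := xs.length with hn
  -- normalize A's slices to take/drop
  simp only [PySem.List.slice_to_natCast, PySem.List.slice_from_natCast]
  set a := (xs.take j).reverse with ha
  set b := xs.drop j with hb
  have hla : a.length = j := by simp [ha]; omega
  have hlb : b.length = n - j := by simp [hb]; omega
  have e3 : b.take (a.take b.length).length = b.take a.length := by
    rw [List.take_eq_take_iff]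
    simp [hla, hlb]
    omega
  rw [e3, take_len_eq_iff]
  rw [walkB_iff xs ((j : Int) - 1) (j : Int) (by omega) (by omega) (by omega) (by omega)]
  constructor
  · intro h k hk hkl
    have hk' : k < j := by omega
    have hkl' : j + k < n := by omega
    have := h k (by omega) (by omega)
    rw [PySem.List.pyGetD_eq_getElem xs (i := (j : Int) - 1 - k) "" (by omega) (by omega),
        PySem.List.pyGetD_eq_getElem xs (i := (j : Int) + k) "" (by omega) (by omega)]
    have i1 : ((j : Int) - 1 - k).toNat = j - 1 - k := by omega
    have i2 : ((j : Int) + k).toNat = j + k := by omega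
    simp only [i1, i2]
    have ga : a[k]'(by omega) = xs[j - 1 - k]'(by omega) := by
      simp [ha, List.getElem_reverse, List.getElem_take]
      congr 1
      omega
    have gb : b[k]'(by omega) = xs[j + k]'(by omega) := by
      simp [hb, List.getElem_drop]
    rw [← ga, ← gb]
    exact this
  · intro h k h1' h2'
    have hk : k < j := by omega
    have hkl : j + k < n := by omega
    have := h k (by omega) (by omega)
    rw [PySem.List.pyGetD_eq_getElem xs (i := (j : Int) - 1 - k) "" (by omega) (by omega),
        PySem.List.pyGetD_eq_getElem xs (i := (j : Int) + k) "" (by omega) (by omega)] at this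
    have i1 : ((j : Int) - 1 - k).toNat = j - 1 - k := by omega
    have i2 : ((j : Int) + k).toNat = j + k := by omega
    simp only [i1, i2] at this
    have ga : a[k]'(by omega) = xs[j - 1 - k]'(by omega) := by
      simp [ha, List.getElem_reverse, List.getElem_take]
      congr 1
      omega
    have gb : b[k]'(by omega) = xs[j + k]'(by omega) := by
      simp [hb, List.getElem_drop]
    rw [ga, gb]
    exact this

lemma go_eq (xs : List String) (l : List Int)
    (hl : ∀ i ∈ l, 1 ≤ i ∧ i < (xs.length : Int)) :
    goA xs l = goB xs (xs.length : Int) l := by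
  induction l with
  | nil => rfl
  | cons i rest ih =>
    obtain ⟨hi1, hi2⟩ := hl i (List.mem_cons_self ..)
    have hc := cond_eq xs i hi1 hi2
    simp only [goA, goB]
    by_cases hA : PySem.List.slice (PySem.List.slice xs none (some i)).reverse none
        (some ((PySem.List.slice xs (some i) none).length : Int)) =
      PySem.List.slice (PySem.List.slice xs (some i) none) none
        (some ((PySem.List.slice (PySem.List.slice xs none (some i)).reverse none
          (some ((PySem.List.slice xs (some i) none).length : Int))).length : Int))
    · rw [if_pos hA, if_pos (hc.mp hA)]
    · rw [if_neg hA, if_neg (fun hB => hA (hc.mpr hB))]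
      exact ih (fun i hi => hl i (List.mem_cons_of_mem _ hi))

-- ===== VERDICT (by name: the statement is the Claim_ definition above) =====
theorem GetMirroredLines_spec : Claim_equal_GetMirroredLines := by
  intro mirrors _
  unfold Spec_GetMirroredLines GetMirroredLines GetMirroredLines_alt
  exact go_eq mirrors _ (fun i hi => by
    have := (PySem.List.mem_pyRange_one).1 hi; exact ⟨this.1, this.2⟩)
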